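-- pv_equiv track=rewrite | github.com/Abhijeet-Chauhan/DataStructures | 5-Patterns/code2.py | hollow_sqaure_n
-- ===== SOURCE A (Python) =====
-- def hollow_sqaure_n(n):
--     lst = []
--     for i in range(n):
--         if i == 0 or i == n-1:
--             lst.append('*'*n)
--         else:
--             lst.append('*'+' '*(n-2)+'*')
--
--     return lst
-- ===== SOURCE B (Python) =====
-- def hollow_sqaure_n(n):
--     if n <= 0:
--         return []
--     grid = [bytearray(b' ' * n) for _ in range(n)]
--     grid[0] = bytearray(b'*' * n)
--     grid[n - 1] = bytearray(b'*' * n)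
--     for row in grid:
--         row[0] = 42       # ord('*')
--         row[n - 1] = 42
--     return [row.decode('ascii') for row in grid]
-- ===== Notes on version B (the rewrite author's own statement) =====
-- stated objective: alternative
-- what changed: B draws on a canvas: it allocates an all-space n-by-n grid and then paints the border in separate passes (overwrite top row, overwrite bottom row, then mutate the first and last cell of every row), instead of A's single loop that assembles each row string with a per-row branch.
import Mathlib
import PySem

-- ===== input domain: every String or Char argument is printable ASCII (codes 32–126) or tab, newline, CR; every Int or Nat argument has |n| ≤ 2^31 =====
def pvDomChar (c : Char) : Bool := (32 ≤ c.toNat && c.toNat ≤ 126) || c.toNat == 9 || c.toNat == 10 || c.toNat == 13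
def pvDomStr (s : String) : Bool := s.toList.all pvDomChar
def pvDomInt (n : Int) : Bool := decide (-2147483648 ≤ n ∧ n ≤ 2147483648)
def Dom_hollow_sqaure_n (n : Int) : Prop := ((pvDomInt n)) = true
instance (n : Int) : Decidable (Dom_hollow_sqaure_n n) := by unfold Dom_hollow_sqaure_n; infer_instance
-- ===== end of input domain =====

-- B paints a hollow square on a blank canvas (all-space grid, then border overwrites in separate passes) instead of A's row-by-row assembly with a branch; alternative decomposition, same cost.


-- ===== PORT A =====
def hollow_sqaure_n (n : Int) : List String :=
  (PySem.List.pyRange 0 n 1).foldl (fun lst i =>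
    if i == 0 || i == n - 1 then
      lst ++ [String.mk (List.replicate n.toNat '*')]
    else
      lst ++ [String.mk ('*' :: (List.replicate (n - 2).toNat ' ' ++ ['*']))]) []

-- ===== PORT B =====
def hollow_sqaure_n_alt (n : Int) : List String :=
  if n ≤ 0 then []
  else
    let m := n.toNat
    let grid : List (List Char) := List.replicate m (List.replicate m ' ')
    let grid := grid.set 0 (List.replicate m '*')
    let grid := grid.set (m - 1) (List.replicate m '*')
    let grid := grid.map (fun row => (row.set 0 '*').set (m - 1) '*')
    grid.map String.mk

-- ===== PRECONDITION & SPEC =====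
def Spec_hollow_sqaure_n (n : Int) (out : List String) : Prop := out = hollow_sqaure_n_alt n
instance (n : Int) (out : List String) : Decidable (Spec_hollow_sqaure_n n out) := by unfold Spec_hollow_sqaure_n; infer_instance

-- ===== CLAIM =====
def Claim_equal_hollow_sqaure_n : Prop := ∀ (n : Int), Dom_hollow_sqaure_n n → Spec_hollow_sqaure_n n (hollow_sqaure_n n)

-- ===== LEMMAS AND PROOFS =====

-- a foldl that only appends singletons is a map
theorem foldl_append_map {α β : Type} (f : α → β) (l : List α) (acc : List β) :
    l.foldl (fun xs i => xs ++ [f i]) acc = acc ++ l.map f := by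
  induction l generalizing acc with
  | nil => simp
  | cons x xs ih => simp [List.foldl_cons, ih]

theorem a_eq_map (n : Int) :
    hollow_sqaure_n n
    = (PySem.List.pyRange 0 n 1).map (fun i =>
        if i == 0 || i == n - 1 then String.mk (List.replicate n.toNat '*')
        else String.mk ('*' :: (List.replicate (n - 2).toNat ' ' ++ ['*']))) := by
  unfold hollow_sqaure_n
  have hbody : (fun (lst : List String) (i : Int) =>
      if i == 0 || i == n - 1 then lst ++ [String.mk (List.replicate n.toNat '*')]
      else lst ++ [String.mk ('*' :: (List.replicate (n - 2).toNat ' ' ++ ['*']))])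
    = (fun (lst : List String) (i : Int) =>
      lst ++ [if i == 0 || i == n - 1 then String.mk (List.replicate n.toNat '*')
              else String.mk ('*' :: (List.replicate (n - 2).toNat ' ' ++ ['*']))]) := by
    funext lst i; split <;> rfl
  rw [hbody, foldl_append_map]
  rfl

-- painting the two end cells of an all-star row changes nothing
theorem set_star_replicate (m k : Nat) :
    (List.replicate m '*').set k '*' = List.replicate m '*' := by
  apply List.ext_getElem
  · simp
  · intro j hj hj'
    rw [List.getElem_set]
    split <;> simp

-- painting the two end cells of an all-space row yields A's interior row shape
theorem paint_space_row (m : Nat) (hm : 2 ≤ m) :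
    ((List.replicate m ' ').set 0 '*').set (m - 1) '*'
    = '*' :: (List.replicate (m - 2) ' ' ++ ['*']) := by
  apply List.ext_getElem
  · simp; omega
  · intro j hj hj'
    have hjm : j < m := by simpa using hj
    rw [List.getElem_set, List.getElem_set]
    by_cases h0 : j = 0
    · subst h0
      rw [if_neg (by omega), if_pos rfl]
      simp
    · obtain ⟨jp, rfl⟩ : ∃ jp, j = jp + 1 := ⟨j - 1, by omega⟩
      rw [List.getElem_cons_succ]
      by_cases hl : m - 1 = jp + 1
      · rw [if_pos hl]
        rw [List.getElem_append_right (by simp; omega)]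
        simp
      · rw [if_neg hl, if_neg (by omega), List.getElem_replicate]
        rw [List.getElem_append_left (by simp; omega)]
        simp

theorem rows_eq (n : Int) : hollow_sqaure_n n = hollow_sqaure_n_alt n := by
  rw [a_eq_map]
  unfold hollow_sqaure_n_alt
  by_cases h0 : n ≤ 0
  · rw [if_pos h0, PySem.List.pyRange_one]
    simp; omega
  · rw [if_neg h0]
    simp only []
    have hm1 : 1 ≤ n.toNat := by omega
    apply List.ext_getElem
    · simp [PySem.List.length_pyRange_one]
    · intro i hi hi'
      have him : i < n.toNat := by
        simpa [PySem.List.length_pyRange_one] using hi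
      rw [List.getElem_map, PySem.List.getElem_pyRange_one]
      have hval : (0 : Int) + i = (i : Int) := by ring
      rw [hval]
      rw [List.getElem_map, List.getElem_map, List.getElem_set, List.getElem_set]
      by_cases hb : i = 0 ∨ i = n.toNat - 1
      case pos =>
        have hc : ((i : Int) == 0 || (i : Int) == n - 1) = true := by
          rcases hb with h | h <;> (subst h; simp only [Bool.or_eq_true, beq_iff_eq]; omega)
        rw [hc, if_pos rfl]
        have hrow : (if n.toNat - 1 = i then List.replicate n.toNat '*'
            else if 0 = i then List.replicate n.toNat '*'
            else (List.replicate n.toNat (List.replicate n.toNat ' '))[i]'(by simpa using him))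
            = List.replicate n.toNat '*' := by
          rcases hb with h | h
          · subst h
            by_cases hz : n.toNat - 1 = 0
            · rw [if_pos hz]
            · rw [if_neg hz, if_pos rfl]
          · rw [if_pos h.symm]
        rw [hrow, set_star_replicate, set_star_replicate]
      case neg =>
        push_neg at hb
        have hc : ((i : Int) == 0 || (i : Int) == n - 1) = false := by
          simp only [Bool.or_eq_false_iff, beq_eq_false_iff_ne]
          constructor <;> intro h <;> omega
        rw [hc, if_neg (by simp), if_neg (by omega), if_neg (by omega), List.getElem_replicate]
        rw [paint_space_row n.toNat (by omega)]
        have : (n - 2).toNat = n.toNat - 2 := by omega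
        rw [this]

-- ===== VERDICT =====
theorem hollow_sqaure_n_spec : Claim_equal_hollow_sqaure_n := by
  intro n _
  unfold Spec_hollow_sqaure_n
  exact rows_eq n
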